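-- pv_equiv track=rewrite | github.com/ju214425/algorithm | 프로그래머스/3/152995. 인사고과/인사고과.py | solution
-- ===== SOURCE A (Python) =====
-- def solution(scores):
--     answer = -1
--
--     cs = list()
--     arr = list()
--     d = dict()
--
--     for idx, score in enumerate(scores):
--         cs.append( (score[0], score[1], idx) )
--
--     cs.sort(key = lambda x :(-x[0], -x[1]))
--
--     prevX = cs[0][0]
--     prevY = cs[0][1]
--     currX = cs[0][0]
--     currY = cs[0][1]
--     arr.append(cs[0])
--
--     for i in range(1, len(cs)):
--         if cs[i-1][0] != cs[i][0]:
--             prevX = currX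
--             prevY = max(prevY, currY)
--             currX = cs[i][0]
--             currY = max(currY, cs[i][1])
--
--         if cs[i][0] < prevX and cs[i][1] < prevY:
--             pass
--         else:
--             arr.append(cs[i])
--
--     arr.sort(key = lambda x: (-(x[0] + x[1]), x[2]))
--
--     for idx, val in enumerate(arr):
--         if val[2] == 0:
--             answer = idx + 1
--
--     return answer
-- ===== SOURCE B (Python) =====
-- def solution(scores):
--     def dominated(r):
--         for q in scores:
--             if q[0] > r[0] and q[1] > r[1]:
--                 return True
--         return False
--
--     r0 = scores[0]
--     if dominated(r0):
--         return -1
--     s0 = r0[0] + r0[1]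
--     rank = 1
--     for r in scores:
--         if not dominated(r) and r[0] + r[1] > s0:
--             rank += 1
--     return rank
-- ===== Notes on version B (the rewrite author's own statement) =====
-- stated objective: simpler
-- what changed: B removes both sorts and the prefix-maximum sweep: it tests domination of person 0 directly, then returns 1 plus the count of non-dominated rows whose score sum strictly exceeds person 0's (person 0 wins all sum ties because it has the smallest index in A's (-sum, idx) sort).
import Mathlib
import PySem

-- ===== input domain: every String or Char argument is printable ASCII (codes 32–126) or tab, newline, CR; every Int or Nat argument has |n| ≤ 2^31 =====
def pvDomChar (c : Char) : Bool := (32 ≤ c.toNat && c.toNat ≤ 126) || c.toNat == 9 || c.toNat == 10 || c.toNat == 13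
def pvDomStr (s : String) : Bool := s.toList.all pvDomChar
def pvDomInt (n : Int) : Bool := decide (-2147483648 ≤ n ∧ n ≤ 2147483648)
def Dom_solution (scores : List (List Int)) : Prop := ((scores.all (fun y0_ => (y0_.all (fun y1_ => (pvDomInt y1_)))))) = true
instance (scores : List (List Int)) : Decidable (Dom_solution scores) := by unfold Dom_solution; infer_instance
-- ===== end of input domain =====

-- B removes A's two sorts and the prefix-maximum sweep: it counts the non-dominated rows with a
-- strictly larger score sum directly (objective: simpler; same return value on Pre_).


-- ===== PORT A =====
-- the loop 'for i in range(1, len(cs))' carried as structural recursion on the tail,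
-- with prev = cs[i-1]; state (prevX, prevY, currX, currY) exactly as in the Python
def sweepA (prev : Int × Int × Int) (pX pY cX cY : Int)
    (arr : List (Int × Int × Int)) : List (Int × Int × Int) → List (Int × Int × Int)
  | [] => arr
  | c :: rest =>
      let st := if prev.1 ≠ c.1 then (cX, max pY cY, c.1, max cY c.2.1) else (pX, pY, cX, cY)
      let arr' := if c.1 < st.1 ∧ c.2.1 < st.2.1 then arr else arr ++ [c]
      sweepA c st.1 st.2.1 st.2.2.1 st.2.2.2 arr' rest

def solution (scores : List (List Int)) : Int :=
  -- cs = [(score[0], score[1], idx) …]; pyGetD's default is never read under Pre_ (rows have length ≥ 2)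
  let cs : List (Int × Int × Int) :=
    (PySem.List.enumerate scores).map
      (fun p => (PySem.List.pyGetD p.2 0 0, PySem.List.pyGetD p.2 1 0, p.1))
  let cs1 := PySem.List.sorted2 cs (fun t => -t.1) (fun t => -t.2.1)
  match cs1 with
  | [] => -1  -- unreachable under Pre_ (Python raises IndexError on cs[0] for empty scores)
  | c0 :: rest =>
      let arr := sweepA c0 c0.1 c0.2.1 c0.1 c0.2.1 [c0] rest
      let arr2 := PySem.List.sorted2 arr (fun t => -(t.1 + t.2.1)) (fun t => t.2.2)
      (PySem.List.enumerate arr2).foldl (fun ans p => if p.2.2.2 = 0 then p.1 + 1 else ans) (-1)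

-- ===== PORT B =====
def dominatedB (scores : List (List Int)) (r : List Int) : Bool :=
  scores.any (fun q => decide (PySem.List.pyGetD r 0 0 < PySem.List.pyGetD q 0 0)
                    && decide (PySem.List.pyGetD r 1 0 < PySem.List.pyGetD q 1 0))

def solution_alt (scores : List (List Int)) : Int :=
  match scores with
  | [] => -1  -- unreachable under Pre_ (Python raises IndexError on scores[0])
  | r0 :: _ =>
      if dominatedB scores r0 then -1
      else
        let s0 := PySem.List.pyGetD r0 0 0 + PySem.List.pyGetD r0 1 0
        scores.foldl
          (fun rank r =>
            if !dominatedB scores r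
               && decide (s0 < PySem.List.pyGetD r 0 0 + PySem.List.pyGetD r 1 0)
            then rank + 1 else rank) 1

-- ===== PRECONDITION & SPEC =====
-- Pre_ excludes exactly the inputs where the Python A raises IndexError:
-- empty scores (cs[0]) and rows shorter than 2 (score[0]/score[1]).
def Pre_solution (scores : List (List Int)) : Prop :=
  scores ≠ [] ∧ ∀ r ∈ scores, 2 ≤ r.length
instance (scores : List (List Int)) : Decidable (Pre_solution scores) := by
  unfold Pre_solution; infer_instance

def pvWitness_solution : List (List Int) := [[2, 2], [1, 4], [3, 2], [3, 2], [2, 1]]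

def Spec_solution (scores : List (List Int)) (out : Int) : Prop := out = solution_alt scores
instance (scores : List (List Int)) (out : Int) : Decidable (Spec_solution scores out) := by
  unfold Spec_solution; infer_instance

-- ===== CLAIM (what is proved, stated in full; the proofs are below) =====
def Claim_equal_solution : Prop :=
  ∀ (scores : List (List Int)), Dom_solution scores → Pre_solution scores →
    Spec_solution scores (solution scores)

-- ===== LEMMAS AND PROOFS =====

-- row projections and the triple builder of A's first loop
def pvX (r : List Int) : Int := PySem.List.pyGetD r 0 0
def pvY (r : List Int) : Int := PySem.List.pyGetD r 1 0
def pvF (p : Int × List Int) : Int × Int × Int := (pvX p.2, pvY p.2, p.1)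

-- 'some element of L strictly dominates c'
def domIn (L : List (Int × Int × Int)) (c : Int × Int × Int) : Bool :=
  L.any (fun d => decide (c.1 < d.1) && decide (c.2.1 < d.2.1))

-- the lex keys of A's two sorts
def key1 (t : Int × Int × Int) : Lex (Int × Int) := toLex (-t.1, -t.2.1)
def key2 (t : Int × Int × Int) : Lex (Int × Int) := toLex (-(t.1 + t.2.1), t.2.2)

lemma key1_le_iff (a b : Int × Int × Int) :
    key1 a ≤ key1 b ↔ b.1 < a.1 ∨ (a.1 = b.1 ∧ b.2.1 ≤ a.2.1) := by
  simp only [key1, Prod.Lex.toLex_le_toLex]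
  omega

-- Python's sorted(key=lambda x: (k1(x), k2(x))) is a single sort by the lexicographic key
lemma sorted2_eq_sorted_lex {α : Type} (xs : List α) (k1 k2 : α → Int) :
    PySem.List.sorted2 xs k1 k2 = PySem.List.sorted xs (fun t => toLex (k1 t, k2 t)) := by
  unfold PySem.List.sorted2 PySem.List.sorted
  simp only [if_neg (by decide : ¬ (false = true))]
  have h : (fun a b => decide (k1 a < k1 b) || !decide (k1 b < k1 a) && decide (k2 a < k2 b))
      = (fun a b => decide (toLex (k1 a, k2 a) < toLex (k1 b, k2 b))) := by
    funext a b
    rcases lt_trichotomy (k1 a) (k1 b) with h1 | h1 | h1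
    · simp [Prod.Lex.toLex_lt_toLex, h1, not_lt.mpr h1.le]
    · simp [Prod.Lex.toLex_lt_toLex, h1]
    · simp [Prod.Lex.toLex_lt_toLex, h1, not_lt.mpr h1.le, ne_of_gt h1]
  rw [h]

-- A's sweep over the sorted list keeps exactly the entries no element strictly dominates
lemma sweepA_eq_filter (L : List (Int × Int × Int))
    (hsort : L.Pairwise (fun a b => key1 a ≤ key1 b)) :
    ∀ (R Q arr : List (Int × Int × Int)) (prev : Int × Int × Int) (pX pY cX cY : Int),
      L = Q ++ R →
      Q.getLast? = some prev →
      cX = prev.1 →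
      ((∀ p ∈ Q, p.2.1 ≤ cY) ∧ cY ∈ Q.map (fun p => p.2.1)) →
      ((pX = cX ∧ pY ≤ cY ∧ ∀ p ∈ Q, p.1 = cX) ∨
       (cX < pX ∧ (∀ p ∈ Q, cX < p.1 → p.2.1 ≤ pY) ∧ ∃ p ∈ Q, cX < p.1 ∧ pY ≤ p.2.1)) →
      sweepA prev pX pY cX cY arr R = arr ++ R.filter (fun c => !domIn L c) := by
  intro R
  induction R with
  | nil => intro Q arr prev pX pY cX cY hL hprev hcX hcY hstate; simp [sweepA]
  | cons c R' ih =>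
    intro Q arr prev pX pY cX cY hL hprev hcX hcY hstate
    obtain ⟨hcYub, hcYmem⟩ := hcY
    obtain ⟨p₁, hp₁Q, hp₁cY⟩ := List.mem_map.mp hcYmem
    have hprevQ : prev ∈ Q := List.mem_of_getLast? hprev
    obtain ⟨Q', hQ'⟩ := List.getLast?_eq_some_iff.mp hprev
    have hpairQ : Q.Pairwise (fun a b => key1 a ≤ key1 b) :=
      (List.pairwise_append.mp (hL ▸ hsort)).1
    have hQbefore : ∀ p ∈ Q, ∀ d ∈ c :: R', key1 p ≤ key1 d :=
      (List.pairwise_append.mp (hL ▸ hsort)).2.2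
    have hle_prev : ∀ p ∈ Q, key1 p ≤ key1 prev := by
      intro p hp
      rw [hQ'] at hp
      rcases List.mem_append.mp hp with h | h
      · exact (List.pairwise_append.mp (hQ' ▸ hpairQ)).2.2 p h prev (by simp)
      · simp at h; subst h; exact le_refl _
    have hprev_c : key1 prev ≤ key1 c := hQbefore prev hprevQ c (by simp)
    have hxc : c.1 ≤ prev.1 := by
      rcases (key1_le_iff prev c).mp hprev_c with h | ⟨h, _⟩ <;> omega
    have hQx : ∀ p ∈ Q, cX ≤ p.1 := by
      intro p hp
      rcases (key1_le_iff p prev).mp (hle_prev p hp) with h | ⟨h, _⟩ <;> omega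
    -- a dominator of c can only sit in the processed prefix Q
    have hdom : domIn L c = true ↔ ∃ p ∈ Q, c.1 < p.1 ∧ c.2.1 < p.2.1 := by
      constructor
      · intro h
        rcases List.any_eq_true.mp h with ⟨d, hd, hdc⟩
        simp only [Bool.and_eq_true, decide_eq_true_eq] at hdc
        rw [hL] at hd
        rcases List.mem_append.mp hd with hd | hd
        · exact ⟨d, hd, hdc⟩
        · exfalso
          rcases List.mem_cons.mp hd with rfl | hd
          · omega
          · have hcd : key1 c ≤ key1 d := by
              have hpair2 : (c :: R').Pairwise (fun a b => key1 a ≤ key1 b) :=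
                (List.pairwise_append.mp (hL ▸ hsort)).2.1
              exact (List.pairwise_cons.mp hpair2).1 d hd
            rcases (key1_le_iff c d).mp hcd with h | ⟨h, _⟩ <;> omega
      · rintro ⟨p, hp, h1, h2⟩
        refine List.any_eq_true.mpr ⟨p, by rw [hL]; exact List.mem_append_left _ hp, by
          simp [h1, h2]⟩
    have hpYcY : pY ≤ cY := by
      rcases hstate with ⟨_, h, _⟩ | ⟨_, _, p₀, hp₀, _, hp₀y⟩
      · exact h
      · exact le_trans hp₀y (hcYub p₀ hp₀)
    by_cases hpc : prev.1 = c.1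
    · -- same x-block: the state is unchanged
      have hcYc : c.2.1 ≤ cY := by
        rcases (key1_le_iff prev c).mp hprev_c with h | ⟨_, h⟩
        · omega
        · exact le_trans h (hcYub prev hprevQ)
      have htest : (c.1 < pX ∧ c.2.1 < pY) ↔ domIn L c = true := by
        rw [hdom]
        rcases hstate with ⟨hpx, _, hall⟩ | ⟨hlt, hub, p₀, hp₀, hp₀x, hp₀y⟩
        · constructor
          · intro ⟨h1, _⟩; omega
          · rintro ⟨p, hp, h1, _⟩; have := hall p hp; omega
        · constructor
          · rintro ⟨_, h2⟩; exact ⟨p₀, hp₀, by omega, by omega⟩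
          · rintro ⟨p, hp, h1, h2⟩
            have := hub p hp (by omega)
            exact ⟨by omega, by omega⟩
      have hnext : sweepA prev pX pY cX cY arr (c :: R')
          = sweepA c pX pY cX cY (if c.1 < pX ∧ c.2.1 < pY then arr else arr ++ [c]) R' := by
        simp [sweepA, hpc]
      rw [hnext]
      have hih := ih (Q ++ [c]) (if c.1 < pX ∧ c.2.1 < pY then arr else arr ++ [c]) c pX pY cX cY
        (by rw [hL]; simp)
        (by simp)
        (by omega)
        ⟨by intro p hp
            rcases List.mem_append.mp hp with h | h
            · exact hcYub p h
            · simp at h; subst h; exact hcYc,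
         by simp only [List.map_append]; exact List.mem_append_left _ hcYmem⟩
        (by rcases hstate with ⟨hpx, hpy, hall⟩ | ⟨hlt, hub, p₀, hp₀, hp₀x, hp₀y⟩
            · exact Or.inl ⟨hpx, hpy, by
                intro p hp
                rcases List.mem_append.mp hp with h | h
                · exact hall p h
                · simp at h; subst h; omega⟩
            · exact Or.inr ⟨hlt, by
                intro p hp
                rcases List.mem_append.mp hp with h | h
                · exact hub p h
                · simp at h; subst h; omega,
                p₀, List.mem_append_left _ hp₀, hp₀x, hp₀y⟩)
      rw [hih]
      by_cases hd : domIn L c = true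
      · rw [if_pos (htest.mpr hd)]
        simp [hd]
      · rw [if_neg (fun h => hd (htest.mp h))]
        simp only [List.filter_cons]
        rw [if_pos (by simp [Bool.not_eq_true] at hd ⊢; exact hd)]
        simp
    · -- x changes: block boundary, the state is advanced
      have hxlt : c.1 < prev.1 := lt_of_le_of_ne hxc (fun h => hpc h.symm)
      have hmax : max pY cY = cY := max_eq_right hpYcY
      have htest : (c.1 < cX ∧ c.2.1 < max pY cY) ↔ domIn L c = true := by
        rw [hdom, hmax]
        constructor
        · rintro ⟨_, h2⟩
          exact ⟨p₁, hp₁Q, by have := hQx p₁ hp₁Q; omega, by omega⟩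
        · rintro ⟨p, hp, h1, h2⟩
          exact ⟨by omega, by have := hcYub p hp; omega⟩
      have hnext : sweepA prev pX pY cX cY arr (c :: R')
          = sweepA c cX (max pY cY) c.1 (max cY c.2.1)
              (if c.1 < cX ∧ c.2.1 < max pY cY then arr else arr ++ [c]) R' := by
        simp [sweepA, hpc]
      rw [hnext]
      have hih := ih (Q ++ [c]) (if c.1 < cX ∧ c.2.1 < max pY cY then arr else arr ++ [c]) c
        cX (max pY cY) c.1 (max cY c.2.1)
        (by rw [hL]; simp)
        (by simp)
        rfl
        ⟨by intro p hp
            rcases List.mem_append.mp hp with h | h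
            · exact le_trans (hcYub p h) (le_max_left _ _)
            · simp at h; subst h; exact le_max_right _ _,
         by rcases max_choice cY c.2.1 with h | h <;> rw [h]
            · simp only [List.map_append]; exact List.mem_append_left _ hcYmem
            · simp⟩
        (Or.inr ⟨by omega,
          by intro p hp hplt
             rcases List.mem_append.mp hp with h | h
             · exact le_trans (hcYub p h) (le_max_right _ _)
             · simp at h; subst h; omega,
          p₁, List.mem_append_left _ hp₁Q,
          by have := hQx p₁ hp₁Q; omega,
          by rw [hmax]; omega⟩)
      rw [hih]
      by_cases hd : domIn L c = true
      · rw [if_pos (htest.mpr hd)]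
        simp [hd]
      · rw [if_neg (fun h => hd (htest.mp h))]
        simp only [List.filter_cons]
        rw [if_pos (by simp [Bool.not_eq_true] at hd ⊢; exact hd)]
        simp

-- the final loop: no element has index 0
lemma foldl_enum_none (l : List (Int × Int × Int)) (s a : Int)
    (h : ∀ x ∈ l, x.2.2 ≠ 0) :
    (PySem.List.enumerate l s).foldl (fun ans p => if p.2.2.2 = 0 then p.1 + 1 else ans) a = a := by
  induction l generalizing s a with
  | nil => simp [PySem.List.enumerate]
  | cons x t ih =>
      simp only [PySem.List.enumerate_cons, List.foldl_cons]
      rw [if_neg (by exact h x (by simp))]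
      exact ih _ _ (fun y hy => h y (by simp [hy]))

-- the final loop: exactly the middle element has index 0
lemma foldl_enum_unique (u v : List (Int × Int × Int)) (c : Int × Int × Int) (s a : Int)
    (hc : c.2.2 = 0) (hv : ∀ x ∈ v, x.2.2 ≠ 0) :
    (PySem.List.enumerate (u ++ c :: v) s).foldl
      (fun ans p => if p.2.2.2 = 0 then p.1 + 1 else ans) a = s + u.length + 1 := by
  induction u generalizing s a with
  | nil =>
      simp only [List.nil_append, PySem.List.enumerate_cons, List.foldl_cons, hc,
        List.length_nil]
      rw [foldl_enum_none _ _ _ hv]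
      push_cast; ring
  | cons x t ih =>
      simp only [List.cons_append, PySem.List.enumerate_cons, List.foldl_cons, List.length_cons]
      rw [ih]
      push_cast; ring

-- domination inside the triple list = domination among the rows
lemma domIn_pvF (scores : List (List Int)) (c : Int × Int × Int) :
    domIn ((PySem.List.enumerate scores).map pvF) c
      = scores.any (fun q => decide (c.1 < pvX q) && decide (c.2.1 < pvY q)) := by
  unfold domIn
  rw [List.any_map]
  conv_rhs => rw [← PySem.List.map_snd_enumerate scores 0, List.any_map]
  rfl

lemma domIn_eq_dominatedB (scores : List (List Int)) (p : Int × List Int) :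
    domIn ((PySem.List.enumerate scores).map pvF) (pvF p) = dominatedB scores p.2 := by
  rw [domIn_pvF]; rfl

-- counting a row predicate through enumerate
lemma countP_enum_snd {alpha : Type} (xs : List alpha) (h : alpha → Bool) :
    ∀ s : Int, List.countP (fun p : Int × alpha => h p.2) (PySem.List.enumerate xs s)
      = List.countP h xs := by
  induction xs with
  | nil => intro s; simp [PySem.List.enumerate]
  | cons x t ih =>
      intro s
      simp only [PySem.List.enumerate_cons, List.countP_cons, ih]

-- ===== VERDICT (by name: the statement is the Claim_ definition above) =====
theorem solution_spec : Claim_equal_solution := by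
  intro scores hdomA hpre
  unfold Spec_solution
  obtain ⟨hne, -⟩ := hpre
  obtain ⟨r0, tl, rfl⟩ : ∃ r0 tl, scores = r0 :: tl := by
    cases scores with
    | nil => exact absurd rfl hne
    | cons a b => exact ⟨a, b, rfl⟩
  simp only [solution, solution_alt]
  rw [sorted2_eq_sorted_lex]
  rw [show (fun t : Int × Int × Int => toLex (-t.1, -t.2.1)) = key1 from rfl]
  rw [show (fun p : Int × List Int => (PySem.List.pyGetD p.2 0 0, PySem.List.pyGetD p.2 1 0, p.1)) = pvF from rfl]
  cases hE : PySem.List.sorted ((PySem.List.enumerate (r0 :: tl)).map pvF) key1 with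
  | nil =>
      exfalso
      rw [PySem.List.sorted_eq_nil_iff] at hE
      simp at hE
  | cons c0 rest =>
      simp only []
      rw [sorted2_eq_sorted_lex]
      rw [show (fun t : Int × Int × Int => toLex (-(t.1 + t.2.1), t.2.2)) = key2 from rfl]
      -- name the ambient list
      have hsort1 : (c0 :: rest).Pairwise (fun a b => key1 a ≤ key1 b) :=
        hE ▸ PySem.List.sorted_pairwise _ _
      have hperm1 : (c0 :: rest).Perm ((PySem.List.enumerate (r0 :: tl)).map pvF) :=
        hE ▸ PySem.List.sorted_perm _ _ _
      -- the sweep result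
      have harr : sweepA c0 c0.1 c0.2.1 c0.1 c0.2.1 [c0] rest
          = [c0] ++ rest.filter (fun c => !domIn (c0 :: rest) c) := by
        exact sweepA_eq_filter (c0 :: rest) hsort1 rest [c0] [c0] c0 c0.1 c0.2.1 c0.1 c0.2.1
          rfl rfl rfl ⟨by simp, by simp⟩ (Or.inl ⟨rfl, le_refl _, by simp⟩)
      rw [harr]
      -- domination is invariant under the sort's permutation
      have hany : ∀ c, domIn (c0 :: rest) c
          = domIn ((PySem.List.enumerate (r0 :: tl)).map pvF) c := by
        intro c
        unfold domIn
        rcases h1 : List.any (c0 :: rest) (fun d => decide (c.1 < d.1) && decide (c.2.1 < d.2.1)) with _ | _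
        · rcases h2 : List.any ((PySem.List.enumerate (r0 :: tl)).map pvF)
              (fun d => decide (c.1 < d.1) && decide (c.2.1 < d.2.1)) with _ | _
          · rfl
          · exfalso
            rcases List.any_eq_true.mp h2 with ⟨d, hd, hdd⟩
            have : (c0 :: rest).any (fun d => decide (c.1 < d.1) && decide (c.2.1 < d.2.1)) = true :=
              List.any_eq_true.mpr ⟨d, hperm1.mem_iff.mpr hd, hdd⟩
            rw [h1] at this; exact Bool.false_ne_true this
        · rcases List.any_eq_true.mp h1 with ⟨d, hd, hdd⟩
          exact (List.any_eq_true.mpr ⟨d, hperm1.mem_iff.mp hd, hdd⟩).symm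
      -- the head is never dominated
      have hc0nd : domIn (c0 :: rest) c0 = false := by
        unfold domIn
        rw [List.any_eq_false]
        intro d hd
        rcases List.mem_cons.mp hd with rfl | hd
        · simp
        · have := (key1_le_iff c0 d).mp ((List.pairwise_cons.mp hsort1).1 d hd)
          simp only [Bool.and_eq_true, decide_eq_true_eq]
          omega
      have hfil : [c0] ++ rest.filter (fun c => !domIn (c0 :: rest) c)
          = (c0 :: rest).filter (fun c => !domIn (c0 :: rest) c) := by
        simp [hc0nd]
      rw [hfil]
      -- index components: distinct and nonnegative
      have hids_nodup_cs :
          ((((PySem.List.enumerate (r0 :: tl)).map pvF)).map (fun t => t.2.2)).Nodup := by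
        rw [List.map_map]
        rw [show ((fun t : Int × Int × Int => t.2.2) ∘ pvF) = Prod.fst from rfl]
        exact List.Pairwise.imp ne_of_lt
          (List.pairwise_map.mpr (PySem.List.pairwise_lt_enumerate (r0 :: tl) 0))
      have hids0 : ∀ t ∈ (PySem.List.enumerate (r0 :: tl)).map pvF, 0 ≤ t.2.2 := by
        intro t ht
        rcases List.mem_map.mp ht with ⟨p, hp, rfl⟩
        rcases (PySem.List.mem_enumerate_iff _ _ _).mp hp with ⟨k, hk, rfl⟩
        simp [pvF]
      have hc0'cs : pvF (0, r0) ∈ (PySem.List.enumerate (r0 :: tl)).map pvF := by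
        rw [PySem.List.enumerate_cons]
        exact List.mem_map.mpr ⟨(0, r0), by simp, rfl⟩
      have huniq0 : ∀ t ∈ (PySem.List.enumerate (r0 :: tl)).map pvF, t.2.2 = 0 → t = pvF (0, r0) := by
        intro t ht h0
        rcases List.mem_map.mp ht with ⟨p, hp, rfl⟩
        rcases (PySem.List.mem_enumerate_iff _ _ _).mp hp with ⟨k, hk, rfl⟩
        have hk0 : k = 0 := by
          have : (pvF (0 + (k : Int), (r0 :: tl)[k])).2.2 = 0 + (k : Int) := rfl
          omega
        subst hk0
        rfl
      rcases hd0 : dominatedB (r0 :: tl) r0 with _ | _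
      · -- person 0 not dominated
        rw [if_neg (by simp)]
        -- the idx-0 triple survives the filter
        have hc0'mem : pvF (0, r0) ∈ (c0 :: rest).filter (fun c => !domIn (c0 :: rest) c) := by
          apply List.mem_filter.mpr
          refine ⟨hperm1.mem_iff.mpr hc0'cs, ?_⟩
          rw [hany, domIn_eq_dominatedB]
          simp [hd0]
        have hc0'srt : pvF (0, r0) ∈ PySem.List.sorted
            ((c0 :: rest).filter (fun c => !domIn (c0 :: rest) c)) key2 :=
          (PySem.List.mem_sorted _ _ _ _).mpr hc0'mem
        obtain ⟨u, v, huv⟩ := List.append_of_mem hc0'srt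
        -- idx components of the second sort's input are distinct
        have hnodup : ((PySem.List.sorted
            ((c0 :: rest).filter (fun c => !domIn (c0 :: rest) c)) key2).map
              (fun t => t.2.2)).Nodup := by
          apply ((PySem.List.sorted_perm _ key2 false).map (fun t => t.2.2)).nodup_iff.mpr
          have hsub : ((c0 :: rest).filter (fun c => !domIn (c0 :: rest) c)).map
              (fun t : Int × Int × Int => t.2.2) |>.Sublist ((c0 :: rest).map (fun t : Int × Int × Int => t.2.2)) :=
            (List.filter_sublist).map (fun t : Int × Int × Int => t.2.2)
          have hnd : ((c0 :: rest).map (fun t : Int × Int × Int => t.2.2)).Nodup :=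
            (hperm1.map (fun t : Int × Int × Int => t.2.2)).nodup_iff.mpr hids_nodup_cs
          exact hnd.sublist hsub
        rw [huv] at hnodup
        rw [List.map_append, List.map_cons] at hnodup
        rcases List.nodup_append.mp hnodup with ⟨hnu, hncv, hdisj⟩
        have hids_c0' : (pvF (0, r0)).2.2 = 0 := rfl
        have hu0 : ∀ e ∈ u, e.2.2 ≠ 0 := by
          intro e he h0
          have := hdisj (a := e.2.2) (List.mem_map_of_mem he) (pvF (0, r0)).2.2
            List.mem_cons_self
          rw [hids_c0'] at this
          exact this h0
        have hv0 : ∀ e ∈ v, e.2.2 ≠ 0 := by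
          intro e he h0
          have := (List.nodup_cons.mp hncv).1
          rw [hids_c0'] at this
          exact this (by rw [← h0]; exact List.mem_map_of_mem he)
        -- key2 order around the pivot
        have hpair2 : (u ++ pvF (0, r0) :: v).Pairwise (fun a b => key2 a ≤ key2 b) :=
          huv ▸ PySem.List.sorted_pairwise _ key2
        have hue : ∀ e ∈ u, key2 e ≤ key2 (pvF (0, r0)) := by
          intro e he
          exact (List.pairwise_append.mp hpair2).2.2 e he _ List.mem_cons_self
        have hve : ∀ e ∈ v, key2 (pvF (0, r0)) ≤ key2 e := by
          intro e he
          exact (List.pairwise_cons.mp (List.pairwise_append.mp hpair2).2.1).1 e he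
        have hkey2inj : ∀ e, key2 e = key2 (pvF (0, r0)) → e.2.2 = 0 := by
          intro e h
          have := congrArg (fun z => (ofLex z).2) h
          simpa [key2] using this
        -- LHS value
        rw [huv, foldl_enum_unique u v (pvF (0, r0)) 0 (-1) hids_c0' hv0]
        -- the count below the pivot
        have h1 : List.countP (fun e => decide (key2 e < key2 (pvF (0, r0))))
            (u ++ pvF (0, r0) :: v) = u.length := by
          rw [List.countP_append, List.countP_cons]
          have hcu : List.countP (fun e => decide (key2 e < key2 (pvF (0, r0)))) u = u.length :=
            List.countP_eq_length.mpr (fun e he => decide_eq_true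
              (lt_of_le_of_ne (hue e he) (fun heq => hu0 e he (hkey2inj e heq))))
          have hcv : List.countP (fun e => decide (key2 e < key2 (pvF (0, r0)))) v = 0 :=
            List.countP_eq_zero.mpr (fun e he => by
              simp only [decide_eq_true_eq]
              exact not_lt.mpr (hve e he))
          simp [hcu, hcv]
        -- transport the count back to the rows
        have h2 : List.countP (fun e => decide (key2 e < key2 (pvF (0, r0))))
            (u ++ pvF (0, r0) :: v)
            = List.countP (fun e => decide (key2 e < key2 (pvF (0, r0))))
                ((c0 :: rest).filter (fun c => !domIn (c0 :: rest) c)) := by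
          have hp := PySem.List.sorted_perm
            ((c0 :: rest).filter (fun c => !domIn (c0 :: rest) c)) key2 false
          rw [huv] at hp
          exact List.Perm.countP_eq _ hp
        have h3 : List.countP (fun e => decide (key2 e < key2 (pvF (0, r0))))
            ((c0 :: rest).filter (fun c => !domIn (c0 :: rest) c))
            = List.countP (fun e => decide (key2 e < key2 (pvF (0, r0))) && !domIn (c0 :: rest) e)
                (c0 :: rest) := List.countP_filter
        have h4 : List.countP (fun e => decide (key2 e < key2 (pvF (0, r0))) && !domIn (c0 :: rest) e)
            (c0 :: rest)
            = List.countP (fun e => decide (key2 e < key2 (pvF (0, r0))) && !domIn (c0 :: rest) e)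
                ((PySem.List.enumerate (r0 :: tl)).map pvF) :=
          List.Perm.countP_eq _ hperm1
        have h5 : List.countP (fun e => decide (key2 e < key2 (pvF (0, r0))) && !domIn (c0 :: rest) e)
            ((PySem.List.enumerate (r0 :: tl)).map pvF)
            = List.countP (fun e => !domIn ((PySem.List.enumerate (r0 :: tl)).map pvF) e
                && decide (pvX r0 + pvY r0 < e.1 + e.2.1))
                ((PySem.List.enumerate (r0 :: tl)).map pvF) := by
          apply List.countP_congr
          intro e he
          rw [hany e]
          have hnn : 0 ≤ e.2.2 := hids0 e he
          have hkey : key2 e < key2 (pvF (0, r0)) ↔ pvX r0 + pvY r0 < e.1 + e.2.1 := by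
            show toLex (-(e.1 + e.2.1), e.2.2) < toLex (-(pvX r0 + pvY r0), (0 : Int))
              ↔ pvX r0 + pvY r0 < e.1 + e.2.1
            rw [Prod.Lex.toLex_lt_toLex]
            omega
          simp only [Bool.and_eq_true, decide_eq_true_eq, hkey]
          tauto
        have h6 : List.countP (fun e => !domIn ((PySem.List.enumerate (r0 :: tl)).map pvF) e
              && decide (pvX r0 + pvY r0 < e.1 + e.2.1))
              ((PySem.List.enumerate (r0 :: tl)).map pvF)
            = List.countP (fun r => !dominatedB (r0 :: tl) r
                && decide (PySem.List.pyGetD r0 0 0 + PySem.List.pyGetD r0 1 0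
                  < PySem.List.pyGetD r 0 0 + PySem.List.pyGetD r 1 0)) (r0 :: tl) := by
          rw [List.countP_map]
          have hfe : ((fun e => !domIn ((PySem.List.enumerate (r0 :: tl)).map pvF) e
              && decide (pvX r0 + pvY r0 < e.1 + e.2.1)) ∘ pvF)
              = (fun p : Int × List Int => !dominatedB (r0 :: tl) p.2
                && decide (PySem.List.pyGetD r0 0 0 + PySem.List.pyGetD r0 1 0
                  < PySem.List.pyGetD p.2 0 0 + PySem.List.pyGetD p.2 1 0)) := by
            funext p
            simp only [Function.comp]
            rw [domIn_eq_dominatedB]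
            rfl
          rw [hfe]
          exact countP_enum_snd (r0 :: tl) (fun r =>
            !dominatedB (r0 :: tl) r &&
              decide (PySem.List.pyGetD r0 0 0 + PySem.List.pyGetD r0 1 0
                < PySem.List.pyGetD r 0 0 + PySem.List.pyGetD r 1 0)) 0
        rw [PySem.List.foldl_if_add_one (fun r => !dominatedB (r0 :: tl) r
          && decide (PySem.List.pyGetD r0 0 0 + PySem.List.pyGetD r0 1 0
            < PySem.List.pyGetD r 0 0 + PySem.List.pyGetD r 1 0)) (r0 :: tl) 1]
        rw [h1] at h2
        rw [h3, h4, h5, h6] at h2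
        rw [← h2]
        ring
      · -- person 0 dominated: both return -1
        rw [if_pos rfl]
        apply foldl_enum_none
        intro x hx
        have hxarr := (PySem.List.mem_sorted _ _ _ _).mp hx
        have hxmem : x ∈ c0 :: rest := List.mem_of_mem_filter hxarr
        have hxcs : x ∈ (PySem.List.enumerate (r0 :: tl)).map pvF := hperm1.mem_iff.mp hxmem
        intro h0
        have hxeq := huniq0 x hxcs h0
        subst hxeq
        have hp := List.of_mem_filter hxarr
        rw [hany, domIn_eq_dominatedB] at hp
        simp only [hd0] at hp
        simp at hp
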